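-- pv_equiv track=rewrite | github.com/ykm989/CodingTest | Programmers/모의고사.py | solution
-- ===== SOURCE A (Python) =====
-- def solution(answers):
--     answer = [0, 0, 0]
--     onesupo = [1, 2, 3, 4, 5]
--     twosupo = [2, 1, 2, 3, 2, 4, 2, 5]
--     thesupo = [3, 3, 1, 1, 2, 2, 4, 4, 5, 5]
--
--     for i in range(0,len(answers)):
--         if onesupo[i % 5] == answers[i]: answer[0] += 1
--         if twosupo[i % 8] == answers[i]: answer[1] += 1
--         if thesupo[i % 10] == answers[i]: answer[2] += 1
--
--     return list(map(lambda i: i[0] + 1, filter(lambda x: x[1] == max(answer), enumerate(answer))))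
-- ===== SOURCE B (Python) =====
-- def _score(pattern, answers):
--     # one pass over answers against a cycling copy of the pattern (no modulo indexing)
--     s = 0
--     pat = pattern
--     for a in answers:
--         if not pat:
--             pat = pattern
--         if a == pat[0]:
--             s += 1
--         pat = pat[1:]
--     return s
--
--
-- def solution(answers):
--     patterns = [[1, 2, 3, 4, 5],
--                 [2, 1, 2, 3, 2, 4, 2, 5],
--                 [3, 3, 1, 1, 2, 2, 4, 4, 5, 5]]
--     scores = [_score(p, answers) for p in patterns]
--     best = max(scores)
--     return [i + 1 for i, v in enumerate(scores) if v == best]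
-- ===== Notes on version B (the rewrite author's own statement) =====
-- stated objective: alternative
-- what changed: B replaces A's single interleaved loop with modulo-indexing into three fixed pattern lists by three independent passes, each consuming a cycling suffix of its pattern (no index arithmetic), then picks the winners from the scores list with a comprehension.
import Mathlib
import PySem

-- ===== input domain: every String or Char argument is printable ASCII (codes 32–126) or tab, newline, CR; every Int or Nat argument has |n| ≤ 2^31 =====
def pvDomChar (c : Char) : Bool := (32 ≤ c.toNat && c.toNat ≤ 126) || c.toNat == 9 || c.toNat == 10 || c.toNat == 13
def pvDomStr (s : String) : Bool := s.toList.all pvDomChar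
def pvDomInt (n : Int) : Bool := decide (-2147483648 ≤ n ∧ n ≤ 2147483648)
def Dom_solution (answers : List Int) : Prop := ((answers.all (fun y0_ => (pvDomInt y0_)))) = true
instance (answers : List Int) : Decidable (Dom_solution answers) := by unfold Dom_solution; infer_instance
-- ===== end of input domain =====

-- B computes the three scores as three independent cycling passes (no modulo indexing) instead of
-- A's single interleaved modulo-indexed loop; same cost, alternative decomposition.

-- ===== PORT A =====
def solution (answers : List Int) : List Int :=
  let onesupo : List Int := [1, 2, 3, 4, 5]
  let twosupo : List Int := [2, 1, 2, 3, 2, 4, 2, 5]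
  let thesupo : List Int := [3, 3, 1, 1, 2, 2, 4, 4, 5, 5]
  let answer : Int × Int × Int :=
    (PySem.List.pyRange 0 (PySem.List.len answers) 1).foldl
      (fun st i =>
        (if PySem.List.pyGetD onesupo (PySem.Int.mod i 5) 0 = PySem.List.pyGetD answers i 0
           then st.1 + 1 else st.1,
         if PySem.List.pyGetD twosupo (PySem.Int.mod i 8) 0 = PySem.List.pyGetD answers i 0
           then st.2.1 + 1 else st.2.1,
         if PySem.List.pyGetD thesupo (PySem.Int.mod i 10) 0 = PySem.List.pyGetD answers i 0
           then st.2.2 + 1 else st.2.2))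
      (0, 0, 0)
  let lst : List Int := [answer.1, answer.2.1, answer.2.2]
  let m : Int := (PySem.List.max? lst (fun v => v)).getD 0
  ((PySem.List.enumerate lst 0).filter (fun x => x.2 == m)).map (fun x => x.1 + 1)

-- ===== PORT B =====
-- _score from Source B: fold over answers with state (score, remaining cycling pattern suffix)
def pvScore (pattern : List Int) (answers : List Int) : Int :=
  (answers.foldl
     (fun (st : Int × List Int) a =>
       let pat := if st.2.isEmpty then pattern else st.2
       (if a = PySem.List.pyGetD pat 0 0 then st.1 + 1 else st.1, pat.drop 1))
     (0, pattern)).1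

def solution_alt (answers : List Int) : List Int :=
  let patterns : List (List Int) :=
    [[1, 2, 3, 4, 5], [2, 1, 2, 3, 2, 4, 2, 5], [3, 3, 1, 1, 2, 2, 4, 4, 5, 5]]
  let scores : List Int := patterns.map (fun p => pvScore p answers)
  let best : Int := (PySem.List.max? scores (fun v => v)).getD 0
  (PySem.List.enumerate scores 0).filterMap
    (fun pv => if pv.2 = best then some (pv.1 + 1) else none)

-- ===== PRECONDITION & SPEC =====
def Spec_solution (answers : List Int) (out : List Int) : Prop := out = solution_alt answers
instance (answers : List Int) (out : List Int) : Decidable (Spec_solution answers out) := by unfold Spec_solution; infer_instance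

-- ===== CLAIM (what is proved, stated in full; the proofs are below) =====
def Claim_equal_solution : Prop := ∀ (answers : List Int), Dom_solution answers → Spec_solution answers (solution answers)

-- ===== LEMMAS AND PROOFS =====

-- common reference count: matches of answers against pattern starting at pattern position r
def pvCnt (pat : List Int) : List Int → Nat → Int
  | [], _ => 0
  | a :: rest, r => (if pat.getD r 0 = a then 1 else 0) + pvCnt pat rest ((r + 1) % pat.length)

theorem pvCnt_nil (pat : List Int) (r : Nat) : pvCnt pat [] r = 0 := rfl

theorem pvCnt_cons (pat : List Int) (a : Int) (rest : List Int) (r : Nat) :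
    pvCnt pat (a :: rest) r
      = (if pat.getD r 0 = a then 1 else 0) + pvCnt pat rest ((r + 1) % pat.length) := rfl

-- A's per-pattern index loop equals pvCnt
theorem pvA_loop (pat : List Int) (L : Nat) (hL : pat.length = L)
    (full : List Int) :
    ∀ (tail : List Int) (i0 : Nat) (acc : Int), full.drop i0 = tail →
    (PySem.List.pyRange (i0 : Int) (full.length : Int) 1).foldl
        (fun acc i =>
          if PySem.List.pyGetD pat (PySem.Int.mod i (L : Int)) 0 = PySem.List.pyGetD full i 0
            then acc + 1 else acc) acc
      = acc + pvCnt pat tail (i0 % L) := by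
  intro tail
  induction tail with
  | nil =>
      intro i0 acc hdrop
      have hge : full.length ≤ i0 := List.drop_eq_nil_iff.mp hdrop
      rw [PySem.List.pyRange_one_eq_nil (by exact_mod_cast hge)]
      simp [pvCnt_nil]
  | cons a rest ih =>
      intro i0 acc hdrop
      have hlt : i0 < full.length := by
        by_contra h
        have : full.drop i0 = [] := List.drop_eq_nil_of_le (by omega)
        rw [this] at hdrop; exact (List.cons_ne_nil a rest) hdrop.symm
      rw [PySem.List.pyRange_one_cons (by exact_mod_cast hlt)]
      rw [List.foldl_cons]
      have hget : PySem.List.pyGetD full (i0 : Int) 0 = a := by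
        have h0 : full[i0]? = some a := by
          have h := congrArg (fun l => l[0]?) hdrop
          simpa [List.getElem?_drop] using h
        simp [PySem.List.pyGetD_natCast, List.getD, h0]
      have hmod : PySem.Int.mod (i0 : Int) (L : Int) = ((i0 % L : Nat) : Int) :=
        PySem.Int.mod_natCast i0 L
      have hdrop' : full.drop (i0 + 1) = rest := by
        rw [← List.tail_drop, hdrop]
        rfl
      have hcast : (i0 : Int) + 1 = ((i0 + 1 : Nat) : Int) := by push_cast; ring
      rw [hcast]
      rw [ih (i0 + 1) _ hdrop']
      rw [hget, hmod]
      simp only [PySem.List.pyGetD_natCast]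
      rw [pvCnt_cons, hL]
      rw [Nat.mod_add_mod]
      split_ifs <;> ring

-- B's cycling fold equals pvCnt (body of pvScore's fold, zeta-reduced)
theorem pvB_loop (pattern : List Int) (hne : pattern ≠ []) :
    ∀ (ans : List Int) (acc : Int) (r : Nat), r ≤ pattern.length →
    ((ans.foldl
        (fun (st : Int × List Int) a =>
          (if a = PySem.List.pyGetD (if st.2.isEmpty then pattern else st.2) 0 0
             then st.1 + 1 else st.1,
           (if st.2.isEmpty then pattern else st.2).drop 1))
        (acc, pattern.drop r)).1)
      = acc + pvCnt pattern ans (r % pattern.length) := by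
  intro ans
  induction ans with
  | nil => intro acc r hr; simp [pvCnt_nil]
  | cons a rest ih =>
      intro acc r hr
      have hLpos : 0 < pattern.length := List.length_pos_of_ne_nil hne
      by_cases hcase : r = pattern.length
      · have hdropnil : pattern.drop r = [] := by rw [hcase]; simp
        simp only [List.foldl_cons, hdropnil, List.isEmpty_nil, if_true]
        rw [ih _ 1 (by omega)]
        rw [pvCnt_cons, hcase, Nat.mod_self, PySem.List.pyGetD_zero, Nat.zero_add]
        split_ifs <;> omega
      · have hrlt : r < pattern.length := lt_of_le_of_ne hr hcase
        have hdropne : (pattern.drop r).isEmpty = false := by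
          simp [List.drop_eq_nil_iff]; omega
        simp only [List.foldl_cons, hdropne, Bool.false_eq_true, if_false]
        have hhead : PySem.List.pyGetD (pattern.drop r) 0 0 = pattern.getD r 0 := by
          rw [PySem.List.pyGetD_zero]
          simp [List.getD, List.getElem?_drop]
        have hdd : (pattern.drop r).drop 1 = pattern.drop (r + 1) := by
          rw [List.drop_drop]
        rw [hhead, hdd]
        rw [ih _ (r + 1) (by omega)]
        rw [pvCnt_cons, Nat.mod_eq_of_lt hrlt]
        split_ifs <;> omega

theorem foldl_triple_split {α : Type} (l : List α)
    (f g h : Int → α → Int) (x y z : Int) :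
    l.foldl (fun (st : Int × Int × Int) e => (f st.1 e, g st.2.1 e, h st.2.2 e)) (x, y, z)
      = (l.foldl f x, l.foldl g y, l.foldl h z) := by
  induction l generalizing x y z with
  | nil => rfl
  | cons e t ih => simp [List.foldl_cons, ih]

theorem filterMap_eq_map_filter (l : List (Int × Int)) (m : Int) :
    l.filterMap (fun pv => if pv.2 = m then some (pv.1 + 1) else none)
      = (l.filter (fun x => x.2 == m)).map (fun x => x.1 + 1) := by
  induction l with
  | nil => rfl
  | cons p t ih =>
      by_cases h : p.2 = m <;> simp [h, ih]

theorem pvMain (answers : List Int) : solution answers = solution_alt answers := by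
  have hA1 := pvA_loop [1,2,3,4,5] 5 rfl answers answers 0 0 (by simp)
  have hA2 := pvA_loop [2,1,2,3,2,4,2,5] 8 rfl answers answers 0 0 (by simp)
  have hA3 := pvA_loop [3,3,1,1,2,2,4,4,5,5] 10 rfl answers answers 0 0 (by simp)
  have hB1 := pvB_loop [1,2,3,4,5] (by simp) answers 0 0 (by simp)
  have hB2 := pvB_loop [2,1,2,3,2,4,2,5] (by simp) answers 0 0 (by simp)
  have hB3 := pvB_loop [3,3,1,1,2,2,4,4,5,5] (by simp) answers 0 0 (by simp)
  norm_num at hA1 hA2 hA3 hB1 hB2 hB3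
  simp only [solution, solution_alt, pvScore, PySem.List.len_eq, List.map_cons, List.map_nil]
  rw [foldl_triple_split (l := PySem.List.pyRange 0 ((answers.length : Int)) 1)
        (f := fun acc i => if PySem.List.pyGetD [1, 2, 3, 4, 5] (PySem.Int.mod i 5) 0 = PySem.List.pyGetD answers i 0 then acc + 1 else acc)
        (g := fun acc i => if PySem.List.pyGetD [2, 1, 2, 3, 2, 4, 2, 5] (PySem.Int.mod i 8) 0 = PySem.List.pyGetD answers i 0 then acc + 1 else acc)
        (h := fun acc i => if PySem.List.pyGetD [3, 3, 1, 1, 2, 2, 4, 4, 5, 5] (PySem.Int.mod i 10) 0 = PySem.List.pyGetD answers i 0 then acc + 1 else acc)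
        0 0 0]
  norm_num
  rw [hA1, hA2, hA3, hB1, hB2, hB3]
  rw [filterMap_eq_map_filter]

-- ===== VERDICT (by name: the statement is the Claim_ definition above) =====
theorem solution_spec : Claim_equal_solution := by
  intro answers _
  unfold Spec_solution
  exact pvMain answers
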